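-- pv_equiv track=rewrite | github.com/i960107/algorithm-study | soohyun/week3/효율적인해킹.py | solution_dp
-- ===== SOURCE A (Python) =====
-- from typing import List, Dict, Set
--
-- def solution_dp(n: int, m: int, friends: List[List[int]]) -> List[int]:
--     target = []
--     max_hacked = 0
--     # 한번 탐색한 경로는 탐색할 필요 없음 -> hackable(각 컴퓨터로부터 해킹할 수 있는 컴퓨터의 수)을  기록
--     hackable = [None] * (n + 1)
--     for start in range(1, n + 1):
--         hacked = dfs(friends, start, hackable)
--         if len(hacked) > max_hacked:
--             target, max_hacked = [start], len(hacked)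
--         elif len(hacked) == max_hacked:
--             target.append(start)
--         hackable[start] = hacked
--     return sorted(target)
--
-- def dfs(friends: List[List[int]], start: int, hackable: List[Set[int]]) -> Set[int]:
--     stack = []
--     stack.append(start)
--
--     hacked = set()
--
--     while stack:
--         curr = stack.pop()
--
--         if curr in hacked:
--             continue
--
--         hacked.add(curr)
--         # 이미 탐색한 적 있다면 dfs 중지.
--         # 이미 탐색한 곳이라도 탐색해야함. visited를 udpate할 수 없기 때문에
--         if hackable[curr]:
--             hacked.update(hackable[curr])
--             continue
--
--         for next in friends[curr]:
--             stack.append(next)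
--
--     return hacked
-- ===== SOURCE B (Python) =====
-- def solution_dp(n, m, friends):
--     sizes = []
--     for start in range(1, n + 1):
--         seen = {start}
--         for _ in range(n):
--             seen = seen | {v for u in seen for v in friends[u]}
--         sizes.append(len(seen))
--     best = max(sizes, default=0)
--     return [s for s, sz in zip(range(1, n + 1), sizes) if sz == best]
-- ===== Notes on version B (the rewrite author's own statement) =====
-- stated objective: simpler
-- what changed: Replaces the memoized stack-based DFS (shared hackable cache threaded through every start) by, per start node, a plain bounded fixed-point iteration (n rounds of neighbour-set expansion) that stores only the size, followed by a separate max-and-filter pass over the size list.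
-- outside the precondition, e.g. on solution_dp(2, 0, [[-1], [0], [1]]): A returns [2], B returns [1, 2]; on solution_dp(1, 0, [[5], [1]]): A returns [1], B returns [1]
import Mathlib
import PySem

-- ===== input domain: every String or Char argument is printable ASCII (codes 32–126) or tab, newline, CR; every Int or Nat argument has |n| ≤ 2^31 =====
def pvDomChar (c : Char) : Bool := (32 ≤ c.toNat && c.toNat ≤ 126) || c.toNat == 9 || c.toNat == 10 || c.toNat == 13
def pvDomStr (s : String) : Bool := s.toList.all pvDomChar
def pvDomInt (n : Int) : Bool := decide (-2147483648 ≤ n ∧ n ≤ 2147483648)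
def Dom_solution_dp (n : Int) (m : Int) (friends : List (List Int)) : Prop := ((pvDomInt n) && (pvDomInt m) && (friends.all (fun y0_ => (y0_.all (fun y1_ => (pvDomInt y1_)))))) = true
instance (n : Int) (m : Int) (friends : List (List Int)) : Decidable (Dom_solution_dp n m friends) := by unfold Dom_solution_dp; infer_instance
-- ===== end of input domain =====

-- B replaces A's memoized DFS by a per-node bounded fixed-point iteration plus a separate
-- max-and-filter pass (objective: simpler; equivalence is about the return value only).

-- ===== PORT A =====
-- shared subscript helper: xs[u] read totally (default for the out-of-range reads Pre_ excludes)
def pvEdges (friends : List (List Int)) (u : Int) : List Int := PySem.List.pyGetD friends u []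

def pvMemo (hackable : List (Option (List Int))) (u : Int) : Option (List Int) :=
  PySem.List.pyGetD hackable u none

-- fuel making A's while-loop structurally total; proved sufficient under Pre_ (pvDfs_spec below)
def pvMaxDeg (friends : List (List Int)) : Nat := (friends.map List.length).foldr max 0
def pvFuel (friends : List (List Int)) : Nat :=
  (friends.flatten.length + 1) * (pvMaxDeg friends + 1) + 1

-- the 'while stack:' loop of dfs; the stack is kept top-first (Python pops from the end,
-- so 'for next in friends[curr]: stack.append(next)' pushes friends[curr] reversed, head = top)
def pvDfsLoop (friends : List (List Int)) (hackable : List (Option (List Int))) :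
    Nat → List Int → PySem.Set Int → PySem.Set Int
  | _, [], hacked => hacked
  | 0, _ :: _, hacked => hacked
  | fuel + 1, curr :: rest, hacked =>
    if curr ∈ hacked then pvDfsLoop friends hackable fuel rest hacked
    else
      match pvMemo hackable curr with
      | some s =>
        if s.isEmpty then
          pvDfsLoop friends hackable fuel ((pvEdges friends curr).reverse ++ rest)
            (PySem.Set.add hacked curr)
        else
          pvDfsLoop friends hackable fuel rest (PySem.Set.update (PySem.Set.add hacked curr) s)
      | none =>
        pvDfsLoop friends hackable fuel ((pvEdges friends curr).reverse ++ rest)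
          (PySem.Set.add hacked curr)

def pvDfs (friends : List (List Int)) (start : Int) (hackable : List (Option (List Int))) :
    PySem.Set Int :=
  pvDfsLoop friends hackable (pvFuel friends) [start] (PySem.Set.ofList [])

def pvStepA (friends : List (List Int)) (st : List Int × Int × List (Option (List Int)))
    (start : Int) : List Int × Int × List (Option (List Int)) :=
  let hacked := pvDfs friends start st.2.2
  let tm : List Int × Int :=
    if PySem.Set.len hacked > st.2.1 then ([start], PySem.Set.len hacked)
    else if PySem.Set.len hacked = st.2.1 then (st.1 ++ [start], st.2.1)
    else (st.1, st.2.1)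
  (tm.1, tm.2, PySem.List.pySetD st.2.2 start (some hacked))

def solution_dp (n : Int) (m : Int) (friends : List (List Int)) : List Int :=
  let res := (PySem.List.pyRange 1 (n + 1)).foldl (pvStepA friends)
    ([], 0, List.replicate (n + 1).toNat none)
  PySem.List.sorted res.1 (fun x => x)

-- ===== PORT B =====
-- one relaxation round: seen | {v for u in seen for v in friends[u]}
-- (pvEdges, the shared one-line subscript helper, is Python's friends[u] in both programs)
def pvStepB (friends : List (List Int)) (seen : PySem.Set Int) : PySem.Set Int :=
  PySem.Set.union seen (PySem.Set.ofList (seen.flatMap (fun u => pvEdges friends u)))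

-- len(seen) after n rounds starting from {start}
def pvSizeB (n : Int) (friends : List (List Int)) (start : Int) : Int :=
  let seen := (PySem.List.pyRange 0 n).foldl (fun s _ => pvStepB friends s)
    (PySem.Set.ofList [start])
  PySem.Set.len seen

def solution_dp_alt (n : Int) (m : Int) (friends : List (List Int)) : List Int :=
  let sizes := (PySem.List.pyRange 1 (n + 1)).map (pvSizeB n friends)
  let best := (PySem.List.max? sizes (fun x => x)).getD 0
  (((PySem.List.pyRange 1 (n + 1)).zip sizes).filter (fun p => p.2 == best)).map Prod.fst

-- ===== PRECONDITION & SPEC =====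
-- For n ≥ 1, Pre_ excludes inputs where friends is shorter than n+1 or some edge endpoint is
-- negative or exceeds n: on those A either raises IndexError or silently relies on Python's
-- negative-index wraparound (and on rows A happens never to reach, A returns the ordinary
-- answer; the bound is stated for every row to stay closed-form). For n < 1 A ignores friends
-- and Pre_ imposes nothing.
def Pre_solution_dp (n : Int) (m : Int) (friends : List (List Int)) : Prop :=
  1 ≤ n → (n + 1 ≤ (friends.length : Int) ∧ ∀ l ∈ friends, ∀ v ∈ l, 0 ≤ v ∧ v ≤ n)
instance (n : Int) (m : Int) (friends : List (List Int)) : Decidable (Pre_solution_dp n m friends) := by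
  unfold Pre_solution_dp; infer_instance

def pvWitness_solution_dp : Int × Int × List (List Int) := (2, 1, [[], [2], [1]])

def Spec_solution_dp (n : Int) (m : Int) (friends : List (List Int)) (out : List Int) : Prop :=
  out = solution_dp_alt n m friends
instance (n : Int) (m : Int) (friends : List (List Int)) (out : List Int) :
    Decidable (Spec_solution_dp n m friends out) := by unfold Spec_solution_dp; infer_instance

-- ===== CLAIM (what is proved, stated in full; the proofs are below) =====
def Claim_equal_solution_dp : Prop := ∀ (n : Int) (m : Int) (friends : List (List Int)),
  Dom_solution_dp n m friends → Pre_solution_dp n m friends →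
  Spec_solution_dp n m friends (solution_dp n m friends)

-- ===== LEMMAS AND PROOFS =====

-- reachability along the edge lists (both programs compute sets of pvReach-reachable nodes)
def pvReach (friends : List (List Int)) (a b : Int) : Prop :=
  Relation.ReflTransGen (fun u v => v ∈ pvEdges friends u) a b

-- pure argmax fold mirroring A's target/max_hacked bookkeeping, with an abstract size function
def pvPure (g : Int → Int) : List Int × Int → List Int → List Int × Int
  | tm, [] => tm
  | (t, mx), s :: l =>
    pvPure g (if g s > mx then ([s], g s) else if g s = mx then (t ++ [s], mx) else (t, mx)) l

def pvRunMax (g : Int → Int) (mx : Int) (l : List Int) : Int :=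
  l.foldl (fun a s => max a (g s)) mx

-- iterates of B's relaxation round
def pvIter (friends : List (List Int)) (start : Int) (k : Nat) : PySem.Set Int :=
  (pvStepB friends)^[k] (PySem.Set.ofList [start])

-- ---- edge-list facts ----

theorem pvEdges_flatten {friends : List (List Int)} {u v : Int}
    (h : v ∈ pvEdges friends u) : v ∈ friends.flatten := by
  unfold pvEdges PySem.List.pyGetD at h
  cases hg : PySem.List.pyGet? friends u with
  | none => rw [hg] at h; simp at h
  | some l =>
    rw [hg] at h
    exact List.mem_flatten.mpr ⟨l, PySem.List.mem_of_pyGet?_eq_some friends hg, h⟩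

theorem pvEdges_bound {n : Int} {friends : List (List Int)}
    (hP : ∀ l ∈ friends, ∀ v ∈ l, 0 ≤ v ∧ v ≤ n) {u v : Int}
    (h : v ∈ pvEdges friends u) : 0 ≤ v ∧ v ≤ n := by
  unfold pvEdges PySem.List.pyGetD at h
  cases hg : PySem.List.pyGet? friends u with
  | none => rw [hg] at h; simp at h
  | some l =>
    rw [hg] at h
    exact hP l (PySem.List.mem_of_pyGet?_eq_some friends hg) v h

theorem foldr_max_le_of_mem : ∀ (xs : List Nat) (x : Nat), x ∈ xs → x ≤ xs.foldr max 0
  | a :: t, x, h => by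
    rcases List.mem_cons.mp h with rfl | h
    · exact le_max_left _ _
    · exact le_trans (foldr_max_le_of_mem t x h) (le_max_right _ _)

theorem pvEdges_len_le (friends : List (List Int)) (u : Int) :
    (pvEdges friends u).length ≤ pvMaxDeg friends := by
  unfold pvEdges PySem.List.pyGetD pvMaxDeg
  cases hg : PySem.List.pyGet? friends u with
  | none => simp
  | some l =>
    have hm : l ∈ friends := PySem.List.mem_of_pyGet?_eq_some friends hg
    simpa using foldr_max_le_of_mem (friends.map List.length) l.length
      (List.mem_map_of_mem hm)

theorem pvReach_escape {friends : List (List Int)} (P Q : Int → Prop)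
    (hcl : ∀ u, P u → ∀ v ∈ pvEdges friends u, P v ∨ Q v) :
    ∀ {u x : Int}, pvReach friends u x → P u → P x ∨ ∃ s, Q s ∧ pvReach friends s x := by
  intro u x h
  induction h using Relation.ReflTransGen.head_induction_on with
  | refl => exact fun hp => Or.inl hp
  | @head a c h' h ih =>
    intro hp
    rcases hcl a hp c h' with hv | hv
    · exact ih hv
    · exact Or.inr ⟨c, hv, h⟩

-- ---- Finset bookkeeping for the DFS fuel ----

theorem toFinset_add (s : PySem.Set Int) (c : Int) :
    (PySem.Set.add s c).toFinset = insert c s.toFinset := by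
  ext a; simp [PySem.Set.mem_add]; tauto

theorem card_sdiff_insert {U F : Finset Int} {c : Int} (hcU : c ∈ U) (hc : c ∉ F) :
    (U \ insert c F).card + 1 = (U \ F).card := by
  have h1 : U \ insert c F = (U \ F).erase c := by
    ext a; simp [Finset.mem_sdiff, Finset.mem_erase]; tauto
  have h2 : c ∈ U \ F := Finset.mem_sdiff.mpr ⟨hcU, hc⟩
  rw [h1, Finset.card_erase_of_mem h2]
  have : 0 < (U \ F).card := Finset.card_pos.mpr ⟨c, h2⟩
  omega

-- ---- the memoized DFS loop computes exactly the reachable set ----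

theorem pvDfsLoop_spec (n : Int) (friends : List (List Int))
    (hackable : List (Option (List Int))) (U : Finset Int)
    (hP : ∀ l ∈ friends, ∀ v ∈ l, 0 ≤ v ∧ v ≤ n)
    (hU : ∀ u v : Int, v ∈ pvEdges friends u → v ∈ U)
    (hmemo : ∀ i : Int, 0 ≤ i → i ≤ n → ∀ s, pvMemo hackable i = some s →
      ∀ x, x ∈ s ↔ pvReach friends i x) :
    ∀ (fuel : Nat) (stack : List Int) (hacked : PySem.Set Int),
      stack.length + (U \ hacked.toFinset).card * (pvMaxDeg friends + 1) ≤ fuel →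
      (∀ x ∈ stack, x ∈ U ∧ 0 ≤ x ∧ x ≤ n) →
      (∀ u ∈ hacked, ∀ v ∈ pvEdges friends u, v ∈ hacked ∨ v ∈ stack) →
      hacked.Nodup →
      (pvDfsLoop friends hackable fuel stack hacked).Nodup ∧
      (∀ x, x ∈ pvDfsLoop friends hackable fuel stack hacked ↔
        (x ∈ hacked ∨ ∃ s ∈ stack, pvReach friends s x)) := by
  intro fuel
  induction fuel with
  | zero =>
    intro stack hacked hfuel _ _ hnd
    have hst : stack = [] := List.length_eq_zero_iff.mp (by omega)
    subst hst
    constructor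
    · simpa [pvDfsLoop] using hnd
    · intro x; simp [pvDfsLoop]
  | succ fuel ih =>
    intro stack hacked hfuel hstack hclosed hnd
    rcases stack with _ | ⟨curr, rest⟩
    · constructor
      · simpa [pvDfsLoop] using hnd
      · intro x; simp [pvDfsLoop]
    · simp only [List.length_cons] at hfuel
      obtain ⟨hcU, hc0, hcn⟩ := hstack curr (List.mem_cons_self ..)
      by_cases hmem : curr ∈ hacked
      · -- popped node already hacked: skip
        have hclosed' : ∀ u ∈ hacked, ∀ v ∈ pvEdges friends u, v ∈ hacked ∨ v ∈ rest := by
          intro u hu v hv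
          rcases hclosed u hu v hv with h | h
          · exact Or.inl h
          · rcases List.mem_cons.mp h with rfl | h
            · exact Or.inl hmem
            · exact Or.inr h
        have hrec := ih rest hacked (by omega)
          (fun x hx => hstack x (List.mem_cons_of_mem _ hx)) hclosed' hnd
        have hgoal : pvDfsLoop friends hackable (fuel + 1) (curr :: rest) hacked =
            pvDfsLoop friends hackable fuel rest hacked := by
          simp [pvDfsLoop, hmem]
        rw [hgoal]
        refine ⟨hrec.1, fun x => ?_⟩
        rw [hrec.2 x]
        constructor
        · rintro (h | ⟨s, hs, hr⟩)
          · exact Or.inl h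
          · exact Or.inr ⟨s, List.mem_cons_of_mem _ hs, hr⟩
        · rintro (h | ⟨s, hs, hr⟩)
          · exact Or.inl h
          · rcases List.mem_cons.mp hs with rfl | hs
            · rcases pvReach_escape (fun y => y ∈ hacked) (fun y => y ∈ rest)
                hclosed' hr hmem with h | ⟨t2, ht2, hrt⟩
              · exact Or.inl h
              · exact Or.inr ⟨t2, ht2, hrt⟩
            · exact Or.inr ⟨s, hs, hr⟩
      · -- newly hacked node
        have hcF : curr ∉ hacked.toFinset := by rw [List.mem_toFinset]; exact hmem
        have hcsd : curr ∈ U \ hacked.toFinset := Finset.mem_sdiff.mpr ⟨hcU, hcF⟩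
        have hcard := card_sdiff_insert hcU hcF
        have hpush : ∀ hgoal' : pvDfsLoop friends hackable (fuel + 1) (curr :: rest) hacked =
              pvDfsLoop friends hackable fuel ((pvEdges friends curr).reverse ++ rest)
                (PySem.Set.add hacked curr),
            (pvDfsLoop friends hackable (fuel + 1) (curr :: rest) hacked).Nodup ∧
            (∀ x, x ∈ pvDfsLoop friends hackable (fuel + 1) (curr :: rest) hacked ↔
              (x ∈ hacked ∨ ∃ s ∈ curr :: rest, pvReach friends s x)) := by
          intro hgoal'
          have hstack' : ∀ x ∈ (pvEdges friends curr).reverse ++ rest,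
              x ∈ U ∧ 0 ≤ x ∧ x ≤ n := by
            intro x hx
            rcases List.mem_append.mp hx with hx | hx
            · rw [List.mem_reverse] at hx
              exact ⟨hU curr x hx, (pvEdges_bound hP hx).1, (pvEdges_bound hP hx).2⟩
            · exact hstack x (List.mem_cons_of_mem _ hx)
          have hclosed' : ∀ u ∈ PySem.Set.add hacked curr, ∀ v ∈ pvEdges friends u,
              v ∈ PySem.Set.add hacked curr ∨ v ∈ (pvEdges friends curr).reverse ++ rest := by
            intro u hu v hv
            rcases (PySem.Set.mem_add hacked curr u).mp hu with hu | rfl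
            · rcases hclosed u hu v hv with h | h
              · exact Or.inl ((PySem.Set.mem_add hacked curr v).mpr (Or.inl h))
              · rcases List.mem_cons.mp h with rfl | h
                · exact Or.inl ((PySem.Set.mem_add hacked v v).mpr (Or.inr rfl))
                · exact Or.inr (List.mem_append_right _ h)
            · exact Or.inr (List.mem_append_left _ (List.mem_reverse.mpr hv))
          have hfuel' : ((pvEdges friends curr).reverse ++ rest).length +
              (U \ (PySem.Set.add hacked curr).toFinset).card * (pvMaxDeg friends + 1) ≤ fuel := by
            rw [toFinset_add]
            have hdeg := pvEdges_len_le friends curr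
            have hmul : (U \ hacked.toFinset).card * (pvMaxDeg friends + 1) =
                (U \ insert curr hacked.toFinset).card * (pvMaxDeg friends + 1) +
                (pvMaxDeg friends + 1) := by
              rw [← hcard]; ring
            rw [List.length_append, List.length_reverse]
            omega
          have hrec := ih _ _ hfuel' hstack' hclosed' (PySem.Set.nodup_add hacked curr hnd)
          rw [hgoal']
          refine ⟨hrec.1, fun x => ?_⟩
          rw [hrec.2 x]
          constructor
          · rintro (h | ⟨s2, hs2, hr⟩)
            · rcases (PySem.Set.mem_add hacked curr x).mp h with h | rfl
              · exact Or.inl h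
              · exact Or.inr ⟨x, List.mem_cons_self .., Relation.ReflTransGen.refl⟩
            · rcases List.mem_append.mp hs2 with hs2 | hs2
              · rw [List.mem_reverse] at hs2
                exact Or.inr ⟨curr, List.mem_cons_self .., Relation.ReflTransGen.head hs2 hr⟩
              · exact Or.inr ⟨s2, List.mem_cons_of_mem _ hs2, hr⟩
          · rintro (h | ⟨s2, hs2, hr⟩)
            · exact Or.inl ((PySem.Set.mem_add hacked curr x).mpr (Or.inl h))
            · rcases List.mem_cons.mp hs2 with rfl | hs2
              · rcases Relation.ReflTransGen.cases_head hr with heq | ⟨c, hc, hcx⟩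
                · exact Or.inl ((PySem.Set.mem_add _ _ x).mpr (Or.inr heq.symm))
                · exact Or.inr ⟨c, List.mem_append_left _ (List.mem_reverse.mpr hc), hcx⟩
              · exact Or.inr ⟨s2, List.mem_append_right _ hs2, hr⟩
        cases hm : pvMemo hackable curr with
        | none => exact hpush (by simp [pvDfsLoop, hmem, hm])
        | some s =>
          by_cases hse : s.isEmpty = true
          · exfalso
            have hsnil : s = [] := List.isEmpty_iff.mp hse
            have := (hmemo curr hc0 hcn s hm curr).mpr Relation.ReflTransGen.refl
            rw [hsnil] at this
            simp at this
          · -- memo hit: hacked.update(hackable[curr])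
            have hex := hmemo curr hc0 hcn s hm
            have hnd' := PySem.Set.nodup_update (PySem.Set.add hacked curr) s
              (PySem.Set.nodup_add hacked curr hnd)
            have hmemN : ∀ x, x ∈ PySem.Set.update (PySem.Set.add hacked curr) s ↔
                (x ∈ hacked ∨ pvReach friends curr x) := by
              intro x
              rw [PySem.Set.mem_update, PySem.Set.mem_add, hex x]
              constructor
              · rintro ((h | rfl) | h)
                · exact Or.inl h
                · exact Or.inr Relation.ReflTransGen.refl
                · exact Or.inr h
              · rintro (h | h)
                · exact Or.inl (Or.inl h)
                · exact Or.inr h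
            have hclosed' : ∀ u ∈ PySem.Set.update (PySem.Set.add hacked curr) s,
                ∀ v ∈ pvEdges friends u,
                v ∈ PySem.Set.update (PySem.Set.add hacked curr) s ∨ v ∈ rest := by
              intro u hu v hv
              rcases (hmemN u).mp hu with hu | hu
              · rcases hclosed u hu v hv with h | h
                · exact Or.inl ((hmemN v).mpr (Or.inl h))
                · rcases List.mem_cons.mp h with rfl | h
                  · exact Or.inl ((hmemN v).mpr (Or.inr Relation.ReflTransGen.refl))
                  · exact Or.inr h
              · exact Or.inl ((hmemN v).mpr (Or.inr (Relation.ReflTransGen.tail hu hv)))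
            have hsub : U \ (PySem.Set.update (PySem.Set.add hacked curr) s).toFinset ⊆
                (U \ hacked.toFinset).erase curr := by
              intro a ha
              rw [Finset.mem_sdiff, List.mem_toFinset] at ha
              rw [Finset.mem_erase, Finset.mem_sdiff, List.mem_toFinset]
              have h1 : a ≠ curr := fun h => ha.2
                ((PySem.Set.mem_update _ _ a).mpr (Or.inl ((PySem.Set.mem_add _ _ a).mpr (Or.inr h))))
              have h2 : a ∉ hacked := fun h => ha.2
                ((PySem.Set.mem_update _ _ a).mpr (Or.inl ((PySem.Set.mem_add _ _ a).mpr (Or.inl h))))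
              exact ⟨h1, ha.1, h2⟩
            have hfuel' : rest.length +
                (U \ (PySem.Set.update (PySem.Set.add hacked curr) s).toFinset).card *
                  (pvMaxDeg friends + 1) ≤ fuel := by
              have hc1 := Finset.card_le_card hsub
              rw [Finset.card_erase_of_mem hcsd] at hc1
              have hle := Nat.mul_le_mul_right (pvMaxDeg friends + 1) hc1
              have hpos : 0 < (U \ hacked.toFinset).card := Finset.card_pos.mpr ⟨curr, hcsd⟩
              have hmul : ((U \ hacked.toFinset).card - 1) * (pvMaxDeg friends + 1) +
                  (pvMaxDeg friends + 1) = (U \ hacked.toFinset).card * (pvMaxDeg friends + 1) := by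
                obtain ⟨c', hc'⟩ : ∃ c', (U \ hacked.toFinset).card = c' + 1 :=
                  ⟨_, (Nat.succ_pred_eq_of_pos hpos).symm⟩
                rw [hc', Nat.add_sub_cancel]; ring
              omega
            have hrec := ih rest _ hfuel'
              (fun x hx => hstack x (List.mem_cons_of_mem _ hx)) hclosed' hnd'
            have hgoal : pvDfsLoop friends hackable (fuel + 1) (curr :: rest) hacked =
                pvDfsLoop friends hackable fuel rest
                  (PySem.Set.update (PySem.Set.add hacked curr) s) := by
              simp [pvDfsLoop, hmem, hm, hse]
            rw [hgoal]
            refine ⟨hrec.1, fun x => ?_⟩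
            rw [hrec.2 x, hmemN x]
            constructor
            · rintro ((h | h) | ⟨s2, hs2, hr⟩)
              · exact Or.inl h
              · exact Or.inr ⟨curr, List.mem_cons_self .., h⟩
              · exact Or.inr ⟨s2, List.mem_cons_of_mem _ hs2, hr⟩
            · rintro (h | ⟨s2, hs2, hr⟩)
              · exact Or.inl (Or.inl h)
              · rcases List.mem_cons.mp hs2 with rfl | hs2
                · exact Or.inl (Or.inr hr)
                · exact Or.inr ⟨s2, hs2, hr⟩

theorem pvDfs_spec (n : Int) (friends : List (List Int))
    (hackable : List (Option (List Int)))
    (hP : ∀ l ∈ friends, ∀ v ∈ l, 0 ≤ v ∧ v ≤ n)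
    (hmemo : ∀ i : Int, 0 ≤ i → i ≤ n → ∀ s, pvMemo hackable i = some s →
      ∀ x, x ∈ s ↔ pvReach friends i x)
    (start : Int) (h1 : 1 ≤ start) (h2 : start ≤ n) :
    (pvDfs friends start hackable).Nodup ∧
    (∀ x, x ∈ pvDfs friends start hackable ↔ pvReach friends start x) := by
  have hU : ∀ u v : Int, v ∈ pvEdges friends u → v ∈ insert start friends.flatten.toFinset :=
    fun _ v hv => Finset.mem_insert_of_mem (List.mem_toFinset.mpr (pvEdges_flatten hv))
  have hcardU : (insert start friends.flatten.toFinset).card ≤ friends.flatten.length + 1 := by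
    have h1' := Finset.card_insert_le start friends.flatten.toFinset
    have h2' := List.toFinset_card_le friends.flatten
    omega
  have hfuel : ([start] : List Int).length +
      (insert start friends.flatten.toFinset \
        (PySem.Set.ofList ([] : List Int)).toFinset).card * (pvMaxDeg friends + 1) ≤
      pvFuel friends := by
    have hd : (PySem.Set.ofList ([] : List Int)).toFinset = (∅ : Finset Int) := rfl
    rw [hd, Finset.sdiff_empty]
    have hmul := Nat.mul_le_mul_right (pvMaxDeg friends + 1) hcardU
    unfold pvFuel
    simp only [List.length_singleton]
    omega
  have hstack : ∀ x ∈ ([start] : List Int),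
      x ∈ insert start friends.flatten.toFinset ∧ 0 ≤ x ∧ x ≤ n := by
    intro x hx
    rw [List.mem_singleton] at hx
    subst hx
    exact ⟨Finset.mem_insert_self _ _, by omega, h2⟩
  have hclosed : ∀ u ∈ (PySem.Set.ofList ([] : List Int)),
      ∀ v ∈ pvEdges friends u, v ∈ (PySem.Set.ofList ([] : List Int)) ∨ v ∈ ([start] : List Int) := by
    intro u hu
    simp [PySem.Set.ofList, PySem.Set.empty] at hu
  have hnd : (PySem.Set.ofList ([] : List Int)).Nodup := PySem.Set.nodup_ofList _
  have hmain := pvDfsLoop_spec n friends hackable (insert start friends.flatten.toFinset)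
    hP hU hmemo (pvFuel friends) [start] (PySem.Set.ofList []) hfuel hstack hclosed hnd
  refine ⟨hmain.1, fun x => ?_⟩
  unfold pvDfs
  rw [hmain.2 x]
  constructor
  · rintro (h | ⟨s, hs, hr⟩)
    · simp [PySem.Set.ofList, PySem.Set.empty] at h
    · rw [List.mem_singleton] at hs
      subst hs
      exact hr
  · intro hr
    exact Or.inr ⟨start, List.mem_singleton_self _, hr⟩

-- ---- B's iteration computes exactly the reachable set ----

theorem foldl_const_iterate {α β : Type} (f : α → α) :
    ∀ (l : List β) (a : α), l.foldl (fun s _ => f s) a = f^[l.length] a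
  | [], _ => rfl
  | _ :: l, a => by
    rw [List.foldl_cons, foldl_const_iterate f l (f a), List.length_cons,
      Function.iterate_succ_apply]

theorem mem_pvStepB (friends : List (List Int)) (s : PySem.Set Int) (x : Int) :
    x ∈ pvStepB friends s ↔ x ∈ s ∨ ∃ u ∈ s, x ∈ pvEdges friends u := by
  unfold pvStepB
  rw [PySem.Set.mem_union, PySem.Set.mem_ofList, List.mem_flatMap]

theorem pvIter_succ (friends : List (List Int)) (start : Int) (k : Nat) :
    pvIter friends start (k + 1) = pvStepB friends (pvIter friends start k) := by
  unfold pvIter; rw [Function.iterate_succ_apply']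

theorem nodup_pvIter (friends : List (List Int)) (start : Int) :
    ∀ k, (pvIter friends start k).Nodup
  | 0 => PySem.Set.nodup_ofList _
  | k + 1 => by
    rw [pvIter_succ]
    exact PySem.Set.nodup_union _ _ (nodup_pvIter friends start k)

theorem mem_pvIter_zero (friends : List (List Int)) (start x : Int) :
    x ∈ pvIter friends start 0 ↔ x = start := by
  unfold pvIter
  rw [Function.iterate_zero_apply, PySem.Set.mem_ofList, List.mem_singleton]

theorem pvIter_sound (friends : List (List Int)) (start : Int) :
    ∀ k x, x ∈ pvIter friends start k → pvReach friends start x := by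
  intro k
  induction k with
  | zero => intro x hx; rw [mem_pvIter_zero] at hx; subst hx; exact Relation.ReflTransGen.refl
  | succ k ih =>
    intro x hx
    rw [pvIter_succ, mem_pvStepB] at hx
    rcases hx with hx | ⟨u, hu, hx⟩
    · exact ih x hx
    · exact Relation.ReflTransGen.tail (ih u hu) hx

theorem pvIter_bound {n : Int} {friends : List (List Int)}
    (hP : ∀ l ∈ friends, ∀ v ∈ l, 0 ≤ v ∧ v ≤ n) {start : Int}
    (h1 : 0 ≤ start) (h2 : start ≤ n) :
    ∀ k x, x ∈ pvIter friends start k → 0 ≤ x ∧ x ≤ n := by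
  intro k
  induction k with
  | zero => intro x hx; rw [mem_pvIter_zero] at hx; subst hx; exact ⟨h1, h2⟩
  | succ k ih =>
    intro x hx
    rw [pvIter_succ, mem_pvStepB] at hx
    rcases hx with hx | ⟨u, _, hx⟩
    · exact ih x hx
    · exact pvEdges_bound hP hx

theorem pvIter_mono (friends : List (List Int)) (start : Int) (k : Nat) (x : Int)
    (h : x ∈ pvIter friends start k) : x ∈ pvIter friends start (k + 1) := by
  rw [pvIter_succ, mem_pvStepB]; exact Or.inl h

theorem start_mem_pvIter (friends : List (List Int)) (start : Int) :
    ∀ k, start ∈ pvIter friends start k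
  | 0 => (mem_pvIter_zero friends start start).mpr rfl
  | k + 1 => pvIter_mono friends start k start (start_mem_pvIter friends start k)

theorem pvIter_stab {n : Int} {friends : List (List Int)}
    (hP : ∀ l ∈ friends, ∀ v ∈ l, 0 ≤ v ∧ v ≤ n) {start : Int}
    (h1 : 1 ≤ start) (h2 : start ≤ n) :
    ∀ x, x ∈ pvIter friends start (n.toNat + 1) ↔ x ∈ pvIter friends start n.toNat := by
  have hsub : ∀ k, (pvIter friends start k).toFinset ⊆ Finset.Icc 0 n := by
    intro k a ha
    rw [List.mem_toFinset] at ha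
    have := pvIter_bound hP (by omega) h2 k a ha
    rw [Finset.mem_Icc]; omega
  have hcong : ∀ (s t : PySem.Set Int), (∀ x, x ∈ s ↔ x ∈ t) →
      ∀ x, x ∈ pvStepB friends s ↔ x ∈ pvStepB friends t := by
    intro s t h x
    rw [mem_pvStepB, mem_pvStepB]
    exact or_congr (h x) (exists_congr fun u => and_congr_left fun _ => h u)
  have hprop : ∀ k, (∀ x, x ∈ pvIter friends start (k + 1) ↔ x ∈ pvIter friends start k) →
      ∀ j, k ≤ j → (∀ x, x ∈ pvIter friends start (j + 1) ↔ x ∈ pvIter friends start j) := by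
    intro k hk j hj
    induction j, hj using Nat.le_induction with
    | base => exact hk
    | succ j hj ihj =>
      intro x
      have h1 := hcong _ _ ihj x
      rw [← pvIter_succ friends start (j + 1), ← pvIter_succ friends start j] at h1
      exact h1
  by_cases hex : ∃ k ≤ n.toNat, ∀ x, x ∈ pvIter friends start (k + 1) ↔ x ∈ pvIter friends start k
  · obtain ⟨k, hk, hPk⟩ := hex
    exact hprop k hPk n.toNat hk
  · exfalso
    push_neg at hex
    have hgrow : ∀ k, k ≤ n.toNat →
        (pvIter friends start k).toFinset ⊂ (pvIter friends start (k + 1)).toFinset := by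
      intro k hk
      obtain ⟨x, hx⟩ := hex k hk
      have hxm : x ∈ pvIter friends start (k + 1) ∧ x ∉ pvIter friends start k := by
        rcases hx with h | h
        · exact h
        · exact absurd (pvIter_mono friends start k x h.2) h.1
      refine Finset.ssubset_iff_of_subset ?_ |>.mpr ⟨x, ?_, ?_⟩
      · intro a ha
        rw [List.mem_toFinset] at ha ⊢
        exact pvIter_mono friends start k a ha
      · rw [List.mem_toFinset]; exact hxm.1
      · rw [List.mem_toFinset]; exact hxm.2
    have hcard : ∀ j, j ≤ n.toNat + 1 → j + 1 ≤ (pvIter friends start j).toFinset.card := by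
      intro j
      induction j with
      | zero =>
        intro _
        have hm0 : start ∈ (pvIter friends start 0).toFinset := by
          rw [List.mem_toFinset]; exact start_mem_pvIter friends start 0
        have := Finset.card_pos.mpr ⟨start, hm0⟩
        omega
      | succ j ihj =>
        intro hj
        have h1' := ihj (by omega)
        have h2' := Finset.card_lt_card (hgrow j (by omega))
        omega
    have hfin := hcard (n.toNat + 1) (le_refl _)
    have hle := Finset.card_le_card (hsub (n.toNat + 1))
    rw [Int.card_Icc] at hle
    omega

theorem mem_pvIter_final {n : Int} {friends : List (List Int)}
    (hP : ∀ l ∈ friends, ∀ v ∈ l, 0 ≤ v ∧ v ≤ n) {start : Int}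
    (h1 : 1 ≤ start) (h2 : start ≤ n) :
    ∀ x, x ∈ pvIter friends start n.toNat ↔ pvReach friends start x := by
  intro x
  constructor
  · exact pvIter_sound friends start n.toNat x
  · intro hr
    induction hr with
    | refl => exact start_mem_pvIter friends start n.toNat
    | @tail b c hb he ih =>
      have hc : c ∈ pvIter friends start (n.toNat + 1) := by
        rw [pvIter_succ, mem_pvStepB]
        exact Or.inr ⟨b, ih, he⟩
      exact (pvIter_stab hP h1 h2 c).mp hc

theorem pvSizeB_eq (n : Int) (friends : List (List Int)) (start : Int) :
    pvSizeB n friends start = ((pvIter friends start n.toNat).length : Int) := by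
  unfold pvSizeB pvIter
  rw [foldl_const_iterate (pvStepB friends)]
  have hl : (PySem.List.pyRange 0 n).length = n.toNat := by
    rw [PySem.List.length_pyRange_one]; omega
  rw [hl, PySem.Set.len]

theorem pvSizeB_pos {n : Int} {friends : List (List Int)}
    (hP : ∀ l ∈ friends, ∀ v ∈ l, 0 ≤ v ∧ v ≤ n) {start : Int}
    (h1 : 1 ≤ start) (h2 : start ≤ n) : 1 ≤ pvSizeB n friends start := by
  rw [pvSizeB_eq]
  have : start ∈ pvIter friends start n.toNat := start_mem_pvIter friends start n.toNat
  have := List.length_pos_of_mem this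
  omega

-- ---- same reachable set, same size ----

theorem pvLen_eq {SA SB : List Int} {R : Int → Prop} (hA : SA.Nodup)
    (hmA : ∀ x, x ∈ SA ↔ R x) (hB : SB.Nodup) (hmB : ∀ x, x ∈ SB ↔ R x) :
    SA.length = SB.length :=
  List.Perm.length_eq ((List.perm_ext_iff_of_nodup hA hB).mpr
    (fun a => (hmA a).trans (hmB a).symm))

-- ---- memo table bookkeeping ----

theorem pvMemo_replicate (k : Nat) (i : Int) :
    pvMemo (List.replicate k (none : Option (List Int))) i = none := by
  unfold pvMemo PySem.List.pyGetD
  cases hg : PySem.List.pyGet? (List.replicate k (none : Option (List Int))) i with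
  | none => rfl
  | some o =>
    have := PySem.List.mem_of_pyGet?_eq_some _ hg
    simp [List.eq_of_mem_replicate this]

-- ---- the pure argmax fold in closed form ----

theorem le_pvRunMax (g : Int → Int) : ∀ (l : List Int) (mx : Int), mx ≤ pvRunMax g mx l
  | [], _ => le_refl _
  | s :: l, mx => le_trans (le_max_left _ _) (le_pvRunMax g l (max mx (g s)))

theorem mem_le_pvRunMax (g : Int → Int) :
    ∀ (l : List Int) (mx : Int) (s : Int), s ∈ l → g s ≤ pvRunMax g mx l := by
  intro l
  induction l with
  | nil => intro _ _ h; simp at h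
  | cons a l ih =>
    intro mx s hs
    rcases List.mem_cons.mp hs with rfl | hs
    · exact le_trans (le_max_right _ _) (le_pvRunMax g l (max mx (g s)))
    · exact ih _ s hs

theorem pvRunMax_eq_of_le (g : Int → Int) :
    ∀ (l : List Int) (mx : Int), (∀ s ∈ l, g s ≤ mx) → pvRunMax g mx l = mx := by
  intro l
  induction l with
  | nil => intro _ _; rfl
  | cons a l ih =>
    intro mx h
    have : max mx (g a) = mx := max_eq_left (h a (List.mem_cons_self ..))
    show pvRunMax g (max mx (g a)) l = mx
    rw [this]
    exact ih mx (fun s hs => h s (List.mem_cons_of_mem _ hs))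

theorem lt_pvRunMax_iff (g : Int → Int) (l : List Int) (mx : Int) :
    mx < pvRunMax g mx l ↔ ∃ s ∈ l, mx < g s := by
  constructor
  · intro h
    by_contra hc
    push_neg at hc
    rw [pvRunMax_eq_of_le g l mx hc] at h
    exact lt_irrefl _ h
  · rintro ⟨s, hs, h⟩
    exact lt_of_lt_of_le h (mem_le_pvRunMax g l mx s hs)

theorem pvPure_cons (g : Int → Int) (t : List Int) (mx s : Int) (l : List Int) :
    pvPure g (t, mx) (s :: l) =
      pvPure g (if g s > mx then ([s], g s)
        else if g s = mx then (t ++ [s], mx) else (t, mx)) l := rfl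

theorem pvPure_spec (g : Int → Int) : ∀ (l : List Int) (t : List Int) (mx : Int),
    pvPure g (t, mx) l =
      ((if ∃ s ∈ l, mx < g s then [] else t) ++
        l.filter (fun s => g s == pvRunMax g mx l), pvRunMax g mx l) := by
  intro l
  induction l with
  | nil => intro t mx; simp [pvPure, pvRunMax]
  | cons s l ih =>
    intro t mx
    have hrmc : pvRunMax g mx (s :: l) = pvRunMax g (max mx (g s)) l := rfl
    rcases lt_trichotomy mx (g s) with h1 | h1 | h1
    · -- new maximum
      rw [pvPure_cons, if_pos h1, ih [s] (g s)]
      have hM : pvRunMax g mx (s :: l) = pvRunMax g (g s) l := by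
        rw [hrmc, max_eq_right h1.le]
      have hex : (∃ s' ∈ s :: l, mx < g s') := ⟨s, List.mem_cons_self .., h1⟩
      rw [if_pos hex, hM]
      by_cases h2 : ∃ s' ∈ l, g s < g s'
      · rw [if_pos h2]
        have hlt : g s < pvRunMax g (g s) l := (lt_pvRunMax_iff g l (g s)).mpr h2
        have hne : (g s == pvRunMax g (g s) l) = false := by
          rw [beq_eq_false_iff_ne]; omega
        simp [List.filter_cons, hne]
      · rw [if_neg h2]
        push_neg at h2
        have heq : pvRunMax g (g s) l = g s := pvRunMax_eq_of_le g l (g s) h2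
        have hbe : (g s == pvRunMax g (g s) l) = true := by rw [beq_iff_eq, heq]
        simp [List.filter_cons, hbe]
    · -- ties the running maximum
      rw [pvPure_cons, if_neg (by omega), if_pos h1.symm, ih (t ++ [s]) mx]
      have hM : pvRunMax g mx (s :: l) = pvRunMax g mx l := by
        rw [hrmc, ← h1, max_self]
      rw [hM]
      have hexiff : (∃ s' ∈ s :: l, mx < g s') ↔ (∃ s' ∈ l, mx < g s') := by
        constructor
        · rintro ⟨s', hs', h'⟩
          rcases List.mem_cons.mp hs' with rfl | hs'
          · omega
          · exact ⟨s', hs', h'⟩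
        · rintro ⟨s', hs', h'⟩
          exact ⟨s', List.mem_cons_of_mem _ hs', h'⟩
      by_cases h2 : ∃ s' ∈ l, mx < g s'
      · rw [if_pos h2, if_pos (hexiff.mpr h2)]
        have hlt : mx < pvRunMax g mx l := (lt_pvRunMax_iff g l mx).mpr h2
        have hne : (g s == pvRunMax g mx l) = false := by
          rw [beq_eq_false_iff_ne]; omega
        simp [List.filter_cons, hne]
      · rw [if_neg h2, if_neg (fun hh => h2 (hexiff.mp hh))]
        push_neg at h2
        have heq : pvRunMax g mx l = mx := pvRunMax_eq_of_le g l mx h2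
        have hbe : (g s == pvRunMax g mx l) = true := by rw [beq_iff_eq, heq, ← h1]
        simp [List.filter_cons, hbe]
    · -- below the running maximum
      rw [pvPure_cons, if_neg (by omega), if_neg (by omega), ih t mx]
      have hM : pvRunMax g mx (s :: l) = pvRunMax g mx l := by
        rw [hrmc, max_eq_left h1.le]
      rw [hM]
      have hexiff : (∃ s' ∈ s :: l, mx < g s') ↔ (∃ s' ∈ l, mx < g s') := by
        constructor
        · rintro ⟨s', hs', h'⟩
          rcases List.mem_cons.mp hs' with rfl | hs'
          · omega
          · exact ⟨s', hs', h'⟩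
        · rintro ⟨s', hs', h'⟩
          exact ⟨s', List.mem_cons_of_mem _ hs', h'⟩
      have hne : (g s == pvRunMax g mx l) = false := by
        rw [beq_eq_false_iff_ne]
        have := le_pvRunMax g l mx
        omega
      have hns : ¬ mx < g s := by omega
      simp [hne, hns]


-- ---- A's outer loop equals the pure argmax fold over B's size function ----

theorem outer_red (n : Int) (friends : List (List Int))
    (hP : ∀ l ∈ friends, ∀ v ∈ l, 0 ≤ v ∧ v ≤ n) :
    ∀ (l : List Int) (t : List Int) (mx : Int) (hackable : List (Option (List Int))),
    (∀ s ∈ l, 1 ≤ s ∧ s ≤ n) →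
    hackable.length = (n + 1).toNat →
    (∀ i : Int, 0 ≤ i → i ≤ n → ∀ s, pvMemo hackable i = some s →
      ∀ x, x ∈ s ↔ pvReach friends i x) →
    (l.foldl (pvStepA friends) (t, mx, hackable)).1 =
      (pvPure (pvSizeB n friends) (t, mx) l).1 := by
  intro l
  induction l with
  | nil => intro t mx hackable _ _ _; rfl
  | cons s l ih =>
    intro t mx hackable hl hlen hmemo
    obtain ⟨hs1, hs2⟩ := hl s (List.mem_cons_self ..)
    have hdfs := pvDfs_spec n friends hackable hP hmemo s hs1 hs2
    have hsize : PySem.Set.len (pvDfs friends s hackable) = pvSizeB n friends s := by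
      rw [pvSizeB_eq]
      simp only [PySem.Set.len]
      exact_mod_cast
        pvLen_eq hdfs.1 hdfs.2 (nodup_pvIter friends s n.toNat) (mem_pvIter_final hP hs1 hs2)
    have hsn : s.toNat < hackable.length := by rw [hlen]; omega
    have hlen' : (PySem.List.pySetD hackable s (some (pvDfs friends s hackable))).length =
        (n + 1).toNat := by
      rw [PySem.List.pySetD_of_nonneg hackable _ (by omega : (0 : Int) ≤ s),
        List.length_set, hlen]
    have hmemo' : ∀ i : Int, 0 ≤ i → i ≤ n → ∀ s',
        pvMemo (PySem.List.pySetD hackable s (some (pvDfs friends s hackable))) i = some s' →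
        ∀ x, x ∈ s' ↔ pvReach friends i x := by
      intro i hi0 hin s' hget x
      have hi' : i = ((i.toNat : Nat) : Int) := (Int.toNat_of_nonneg hi0).symm
      have hs' : s = ((s.toNat : Nat) : Int) := (Int.toNat_of_nonneg (by omega)).symm
      unfold pvMemo at hget
      rw [show PySem.List.pySetD hackable s (some (pvDfs friends s hackable)) =
            PySem.List.pySetD hackable ((s.toNat : Nat) : Int) (some (pvDfs friends s hackable))
          from by rw [← hs']] at hget
      rw [hi'] at hget
      rw [PySem.List.pyGetD_pySetD_natCast hackable s.toNat i.toNat _ _ hsn] at hget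
      by_cases heq : i.toNat = s.toNat
      · rw [if_pos heq] at hget
        have hv : some (pvDfs friends s hackable) = some s' := hget
        have hv' : pvDfs friends s hackable = s' := by injection hv
        have his : i = s := by omega
        rw [← hv', his]
        exact hdfs.2 x
      · rw [if_neg heq] at hget
        have hold : pvMemo hackable i = some s' := by unfold pvMemo; rw [hi']; exact hget
        exact hmemo i hi0 hin s' hold x
    have hstepA : pvStepA friends (t, mx, hackable) s =
        ((if pvSizeB n friends s > mx then (([s], pvSizeB n friends s) : List Int × Int)
          else if pvSizeB n friends s = mx then (t ++ [s], mx) else (t, mx)).1,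
         (if pvSizeB n friends s > mx then (([s], pvSizeB n friends s) : List Int × Int)
          else if pvSizeB n friends s = mx then (t ++ [s], mx) else (t, mx)).2,
         PySem.List.pySetD hackable s (some (pvDfs friends s hackable))) := by
      simp only [pvStepA, hsize]
    rw [List.foldl_cons, hstepA, pvPure_cons]
    rcases hif : (if pvSizeB n friends s > mx then (([s], pvSizeB n friends s) : List Int × Int)
        else if pvSizeB n friends s = mx then (t ++ [s], mx) else (t, mx)) with ⟨t2, mx2⟩
    exact ih t2 mx2 _ (fun s' hs' => hl s' (List.mem_cons_of_mem _ hs')) hlen' hmemo' 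

theorem zip_map_filter (g : Int → Int) (best : Int) : ∀ (l : List Int),
    (((l.zip (l.map g)).filter (fun p => p.2 == best)).map Prod.fst) =
      l.filter (fun s => g s == best)
  | [] => rfl
  | s :: l => by
    simp only [List.map_cons, List.zip_cons_cons, List.filter_cons]
    by_cases h : (g s == best) = true
    · simp [h, zip_map_filter g best l]
    · simp [h, zip_map_filter g best l]

-- ===== VERDICT (by name: the statement is the Claim_ definition above) =====
theorem solution_dp_spec : Claim_equal_solution_dp := by
  unfold Claim_equal_solution_dp
  intro n m friends _ hpre
  unfold Spec_solution_dp
  by_cases hn1 : n < 1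
  · -- n ≤ 0: the range is empty and both programs return []
    have hnil : PySem.List.pyRange 1 (n + 1) = [] :=
      PySem.List.pyRange_one_eq_nil (by omega)
    simp only [solution_dp, solution_dp_alt, hnil]
    rw [List.foldl_nil]
    exact PySem.List.sorted_eq_of_perm_of_pairwise_lt _ _ _ (List.Perm.refl _) List.Pairwise.nil
  · -- n ≥ 1
    obtain ⟨hlen, hP⟩ := hpre (by omega)
    simp only [solution_dp, solution_dp_alt]
    have hrange : ∀ s ∈ PySem.List.pyRange 1 (n + 1), 1 ≤ s ∧ s ≤ n := by
      intro s hs; rw [PySem.List.mem_pyRange_one] at hs; omega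
    have hred := outer_red n friends hP (PySem.List.pyRange 1 (n + 1)) [] 0
      (List.replicate (n + 1).toNat none) hrange (by simp)
      (fun i _ _ s hget => by rw [pvMemo_replicate] at hget; cases hget)
    rw [hred, pvPure_spec, ite_self, List.nil_append, zip_map_filter,
      PySem.List.sorted_eq_of_perm_of_pairwise_lt _ _ _ (List.Perm.refl _)
        ((PySem.List.pairwise_lt_pyRange_one 1 (n + 1)).filter _)]
    have hcons : PySem.List.pyRange 1 (n + 1) = 1 :: PySem.List.pyRange 2 (n + 1) := by
      have h := PySem.List.pyRange_one_cons (a := 1) (b := n + 1) (by omega)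
      simpa using h
    have hpos1 : 1 ≤ pvSizeB n friends 1 := pvSizeB_pos hP (le_refl 1) (by omega)
    have hbest : (PySem.List.max? ((PySem.List.pyRange 1 (n + 1)).map (pvSizeB n friends))
        (fun x => x)).getD 0 =
        pvRunMax (pvSizeB n friends) 0 (PySem.List.pyRange 1 (n + 1)) := by
      rw [hcons, List.map_cons, PySem.List.max?_id_cons, Option.getD_some]
      show List.foldl max (pvSizeB n friends 1) ((PySem.List.pyRange 2 (n + 1)).map (pvSizeB n friends)) =
        pvRunMax (pvSizeB n friends) (max 0 (pvSizeB n friends 1)) (PySem.List.pyRange 2 (n + 1))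
      rw [max_eq_right (by omega : (0 : Int) ≤ pvSizeB n friends 1)]
      rw [List.foldl_map]
      rfl
    rw [hbest]
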